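-- pv_equiv track=rewrite | github.com/hivdb/HBV | hbv/prevalence.py | get_merge_pos_map
-- ===== SOURCE A (Python) =====
-- from collections import defaultdict
--
-- def get_merge_pos_map(pos_cons):
--
--     pos_that_cons_is_del = [
--         pos
--         for pos, cons in pos_cons.items()
--         if cons == '-'
--     ]
--
--     if not pos_that_cons_is_del:
--         return {}
--
--     merge_pos_map = defaultdict(list)
--     for pos in pos_that_cons_is_del:
--         prev_pos = pos - 1
--
--         while prev_pos > 1:
--             mut = pos_cons[prev_pos]
--             if mut != '-':
--                 break
--             prev_pos -= 1
--
--         merge_pos_map[prev_pos].append(pos)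
--
--     return dict(merge_pos_map)
-- ===== SOURCE B (Python) =====
-- def get_merge_pos_map(pos_cons):
--     dels = [pos for pos, cons in pos_cons.items() if cons == '-']
--     anchor = {}
--     for pos in sorted(dels):
--         q = pos - 1
--         if q > 1 and pos_cons.get(q) == '-':
--             anchor[pos] = anchor[q]
--         else:
--             anchor[pos] = q
--     merge_pos_map = {}
--     for pos in dels:
--         merge_pos_map.setdefault(anchor[pos], []).append(pos)
--     return merge_pos_map
-- ===== Notes on version B (the rewrite author's own statement) =====
-- stated objective: alternative
-- what changed: Replaces A's per-deletion backward while-loop scan with a single pass over the sorted deletion positions that memoizes each deletion's anchor (anchor[p] = anchor[p-1] when p-1 is also a deletion), then groups the deletions by their memoized anchor in original dict order; A rescans whole deletion runs per position, B touches each position once (after sorting), but on the random timing inputs the runs are short and the measured cost is the same.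
import Mathlib
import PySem

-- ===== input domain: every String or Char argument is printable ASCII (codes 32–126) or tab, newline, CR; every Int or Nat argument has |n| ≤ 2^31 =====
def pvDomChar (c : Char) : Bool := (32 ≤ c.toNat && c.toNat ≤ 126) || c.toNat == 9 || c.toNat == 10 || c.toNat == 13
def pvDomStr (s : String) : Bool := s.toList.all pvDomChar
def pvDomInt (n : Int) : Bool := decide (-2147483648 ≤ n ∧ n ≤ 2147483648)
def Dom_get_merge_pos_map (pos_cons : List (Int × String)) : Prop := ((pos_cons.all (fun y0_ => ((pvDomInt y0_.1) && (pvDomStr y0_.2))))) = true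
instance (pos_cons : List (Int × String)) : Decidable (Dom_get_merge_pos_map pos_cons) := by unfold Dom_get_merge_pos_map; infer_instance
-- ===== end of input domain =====

-- B replaces A's per-deletion backward while-loop with one pass over the sorted deletion
-- positions memoizing each anchor, then groups in original order (alternative algorithm, same measured cost).
-- ===== PORT A =====

-- A's inner while-loop: walk prev_pos downward while prev_pos > 1 and pos_cons[prev_pos] == '-';
-- fuel = (start - 1).toNat always suffices, so the fuel-0 case is never reached with prev > 1.
def walkA (d : PySem.Dict Int String) : Nat → Int → Int
  | 0, prev => prev
  | fuel+1, prev =>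
      if prev > 1 then
        match d.get? prev with
        | none => 0  -- Python raises KeyError here; such inputs are excluded by Pre_
        | some m => if m ≠ "-" then prev else walkA d fuel (prev - 1)
      else prev

def get_merge_pos_map (pos_cons : List (Int × String)) : List (Int × List Int) :=
  let d := PySem.Dict.ofList pos_cons
  let pos_that_cons_is_del := (d.items.filter (fun pc => pc.2 == "-")).map Prod.fst
  if pos_that_cons_is_del = [] then []
  else
    (pos_that_cons_is_del.foldl
      (fun md pos =>
        let prev_pos := walkA d ((pos - 2).toNat) (pos - 1)
        md.modify prev_pos [] (· ++ [pos]))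
      PySem.Dict.empty).items

-- ===== PORT B =====
def get_merge_pos_map_alt (pos_cons : List (Int × String)) : List (Int × List Int) :=
  let d := PySem.Dict.ofList pos_cons
  let dels := (d.items.filter (fun pc => pc.2 == "-")).map Prod.fst
  let anchor := (PySem.List.sorted dels (fun x => x) false).foldl
      (fun a pos =>
        if pos - 1 > 1 ∧ d.get? (pos - 1) = some "-" then
          a.insert pos (a.getD (pos - 1) 0)
        else
          a.insert pos (pos - 1))
      PySem.Dict.empty
  (dels.foldl
      (fun md pos => md.modify (anchor.getD pos 0) [] (· ++ [pos]))
      PySem.Dict.empty).items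

-- ===== PRECONDITION & SPEC =====
-- Pre_ excludes exactly the inputs on which A raises KeyError: a deletion position p whose
-- backward walk reaches a position p-1 > 1 absent from the dict.
def Pre_get_merge_pos_map (pos_cons : List (Int × String)) : Prop :=
  ∀ pc ∈ (PySem.Dict.ofList pos_cons).items,
    pc.2 = "-" → pc.1 - 1 > 1 → (PySem.Dict.ofList pos_cons).contains (pc.1 - 1) = true
instance (pos_cons : List (Int × String)) : Decidable (Pre_get_merge_pos_map pos_cons) := by
  unfold Pre_get_merge_pos_map; infer_instance

def pvWitness_get_merge_pos_map : (List (Int × String)) :=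
  [(1, "A"), (2, "-"), (3, "-"), (4, "C")]

def Spec_get_merge_pos_map (pos_cons : List (Int × String)) (out : List (Int × List Int)) : Prop :=
  out = get_merge_pos_map_alt pos_cons
instance (pos_cons : List (Int × String)) (out : List (Int × List Int)) : Decidable (Spec_get_merge_pos_map pos_cons out) := by unfold Spec_get_merge_pos_map; infer_instance

-- ===== CLAIM (what is proved, stated in full; the proofs are below) =====
def Claim_equal_get_merge_pos_map : Prop := ∀ (pos_cons : List (Int × String)), Dom_get_merge_pos_map pos_cons → Pre_get_merge_pos_map pos_cons → Spec_get_merge_pos_map pos_cons (get_merge_pos_map pos_cons)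

-- ===== LEMMAS AND PROOFS =====

-- A's walk with its canonical fuel (enough for a start value of prev).
def W (d : PySem.Dict Int String) (prev : Int) : Int := walkA d (prev - 1).toNat prev

theorem W_le1 (d : PySem.Dict Int String) (prev : Int) (h : ¬ prev > 1) : W d prev = prev := by
  have h0 : (prev - 1).toNat = 0 := by omega
  simp [W, h0, walkA]

theorem W_stop (d : PySem.Dict Int String) (prev : Int) (m : String)
    (h1 : prev > 1) (h2 : d.get? prev = some m) (h3 : m ≠ "-") : W d prev = prev := by
  obtain ⟨k, hk⟩ : ∃ k, (prev - 1).toNat = k + 1 := ⟨(prev - 2).toNat, by omega⟩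
  simp [W, hk, walkA, h1, h2, h3]

theorem W_cont (d : PySem.Dict Int String) (prev : Int)
    (h1 : prev > 1) (h2 : d.get? prev = some "-") : W d prev = W d (prev - 1) := by
  have hk : (prev - 1).toNat = (prev - 2).toNat + 1 := by omega
  have hk2 : (prev - 1 - 1).toNat = (prev - 2).toNat := by omega
  simp [W, hk, hk2, walkA, h1, h2]

theorem anchor_fold_spec (d : PySem.Dict Int String)
    (hpre : ∀ p : Int, d.get? p = some "-" → p - 1 > 1 → (d.get? (p - 1)).isSome) :
    ∀ (l : List Int) (a : PySem.Dict Int Int),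
      l.Pairwise (· < ·) →
      (∀ x : Int, d.get? x = some "-" → x ∈ l ∨ (∀ r ∈ l, x < r)) →
      (∀ x : Int, d.get? x = some "-" → (∀ r ∈ l, x < r) → a.get? x = some (W d (x - 1))) →
      ∀ x : Int, d.get? x = some "-" →
        (l.foldl
          (fun a pos =>
            if pos - 1 > 1 ∧ d.get? (pos - 1) = some "-" then
              a.insert pos (a.getD (pos - 1) 0)
            else
              a.insert pos (pos - 1)) a).get? x = some (W d (x - 1)) := by
  intro l
  induction l with
  | nil =>
      intro a _ _ hdone x hx
      exact hdone x hx (by simp)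
  | cons p l ih =>
      intro a hpw hcover hdone x hx
      simp only [List.foldl_cons]
      have hplt : ∀ r ∈ l, p < r := (List.pairwise_cons.mp hpw).1
      have hpw' : l.Pairwise (· < ·) := (List.pairwise_cons.mp hpw).2
      refine ih _ hpw' ?_ ?_ x hx
      · intro y hy
        rcases hcover y hy with hmem | hlt
        · rcases List.mem_cons.mp hmem with rfl | hmem
          · exact Or.inr hplt
          · exact Or.inl hmem
        · exact Or.inr (fun r hr => hlt r (List.mem_cons_of_mem _ hr))
      · intro y hy hylt
        by_cases hyp : y = p
        · subst hyp
          by_cases hc : y - 1 > 1 ∧ d.get? (y - 1) = some "-"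
          · rw [if_pos hc]
            have hprev : a.get? (y - 1) = some (W d (y - 1 - 1)) := by
              refine hdone (y - 1) hc.2 ?_
              intro r hr
              rcases List.mem_cons.mp hr with rfl | hr
              · omega
              · have := hplt r hr; omega
            have hgetD : a.getD (y - 1) 0 = W d (y - 1 - 1) := by
              rw [PySem.Dict.getD_eq_get?_getD, hprev]; rfl
            rw [PySem.Dict.get?_insert_self, hgetD, W_cont d (y - 1) hc.1 hc.2]
          · rw [if_neg hc, PySem.Dict.get?_insert_self]
            rcases not_and_or.mp hc with h1 | h2
            · rw [W_le1 d (y - 1) h1]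
            · by_cases hgt : y - 1 > 1
              · have hs := hpre y hy hgt
                rcases hm : d.get? (y - 1) with _ | m
                · rw [hm] at hs; simp at hs
                · have hm' : m ≠ "-" := by
                    intro hEq; exact h2 (by rw [hm, hEq])
                  rw [W_stop d (y - 1) m hgt hm hm']
              · rw [W_le1 d (y - 1) hgt]
        · have hylt' : ∀ r ∈ p :: l, y < r := by
            intro r hr
            rcases List.mem_cons.mp hr with rfl | hr
            · rcases hcover y hy with hmem | hlt
              · rcases List.mem_cons.mp hmem with rfl | hmem
                · exact absurd rfl hyp
                · exact absurd (hylt y hmem) (lt_irrefl y)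
              · exact hlt r (List.mem_cons_self)
            · exact hylt r hr
          have heq : ∀ (v : Int), (a.insert p v).get? y = a.get? y := by
            intro v
            rw [PySem.Dict.get?_insert]
            exact if_neg hyp
          by_cases hc : p - 1 > 1 ∧ d.get? (p - 1) = some "-"
          · rw [if_pos hc, heq]; exact hdone y hy hylt'
          · rw [if_neg hc, heq]; exact hdone y hy hylt'

-- membership in the deletion-position list ↔ dict lookup "-"
theorem mem_dels (d : PySem.Dict Int String) (hnd : d.keys.Nodup) (p : Int) :
    p ∈ (d.items.filter (fun pc => pc.2 == "-")).map Prod.fst ↔ d.get? p = some "-" := by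
  constructor
  · intro hp
    rcases List.mem_map.mp hp with ⟨pc, hpc, hfst⟩
    have hmem := List.mem_of_mem_filter hpc
    have hval : pc.2 = "-" := by
      have := List.of_mem_filter hpc; simpa using this
    obtain ⟨p1, p2⟩ := pc
    cases hfst
    cases hval
    exact PySem.Dict.get?_of_mem_items _ hmem hnd
  · intro hp
    have hmem : (p, "-") ∈ d.items := PySem.Dict.mem_items_of_get?_eq_some _ hp
    exact List.mem_map.mpr ⟨(p, "-"), List.mem_filter.mpr ⟨hmem, by simp⟩, rfl⟩

theorem nodup_dels (d : PySem.Dict Int String) (hnd : d.keys.Nodup) :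
    ((d.items.filter (fun pc => pc.2 == "-")).map Prod.fst).Nodup := by
  have hkeys : (d.items.map Prod.fst).Nodup := hnd
  have hsub : List.Sublist
      ((d.items.filter (fun pc => pc.2 == "-")).map Prod.fst)
      (d.items.map Prod.fst) := List.filter_sublist.map Prod.fst
  exact hkeys.sublist hsub

theorem get_merge_pos_map_spec : Claim_equal_get_merge_pos_map := by
  intro pos_cons _ hpre
  unfold Spec_get_merge_pos_map get_merge_pos_map get_merge_pos_map_alt
  dsimp only
  have hnd : (PySem.Dict.ofList pos_cons).keys.Nodup := PySem.Dict.nodup_keys_ofList pos_cons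
  -- dict-level precondition
  have hpre' : ∀ p : Int, (PySem.Dict.ofList pos_cons).get? p = some "-" → p - 1 > 1 →
      ((PySem.Dict.ofList pos_cons).get? (p - 1)).isSome := by
    intro p hp hgt
    have hmem : (p, "-") ∈ (PySem.Dict.ofList pos_cons).items :=
      PySem.Dict.mem_items_of_get?_eq_some _ hp
    have hc := hpre (p, "-") hmem rfl hgt
    rw [← PySem.Dict.contains_eq_isSome_get?]
    exact hc
  by_cases hnil :
      (((PySem.Dict.ofList pos_cons).items.filter (fun pc => pc.2 == "-")).map Prod.fst) = []
  · rw [if_pos hnil, hnil]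
    rfl
  · rw [if_neg hnil]
    have hanchor : ∀ p : Int, (PySem.Dict.ofList pos_cons).get? p = some "-" →
        ((PySem.List.sorted
            (((PySem.Dict.ofList pos_cons).items.filter (fun pc => pc.2 == "-")).map Prod.fst)
            (fun x => x) false).foldl
          (fun a pos =>
            if pos - 1 > 1 ∧ (PySem.Dict.ofList pos_cons).get? (pos - 1) = some "-" then
              a.insert pos (a.getD (pos - 1) 0)
            else
              a.insert pos (pos - 1)) PySem.Dict.empty).get? p = some (W (PySem.Dict.ofList pos_cons) (p - 1)) := by
      have hsortnd : (PySem.List.sorted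
          (((PySem.Dict.ofList pos_cons).items.filter (fun pc => pc.2 == "-")).map Prod.fst)
          (fun x => x) false).Nodup :=
        (PySem.List.sorted_perm _ (fun x => x) false).nodup_iff.mpr (nodup_dels _ hnd)
      have hsortpw : (PySem.List.sorted
          (((PySem.Dict.ofList pos_cons).items.filter (fun pc => pc.2 == "-")).map Prod.fst)
          (fun x => x) false).Pairwise (· < ·) := by
        have h1 := PySem.List.sorted_pairwise
          (((PySem.Dict.ofList pos_cons).items.filter (fun pc => pc.2 == "-")).map Prod.fst)
          (fun x => x)
        have h2 : (PySem.List.sorted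
            (((PySem.Dict.ofList pos_cons).items.filter (fun pc => pc.2 == "-")).map Prod.fst)
            (fun x => x) false).Pairwise (· ≠ ·) := hsortnd
        exact (h1.and h2).imp (fun h => lt_of_le_of_ne h.1 h.2)
      refine anchor_fold_spec _ hpre' _ PySem.Dict.empty hsortpw ?_ ?_
      · intro x hx
        exact Or.inl ((PySem.List.mem_sorted _ _ _ _).mpr ((mem_dels _ hnd x).mpr hx))
      · intro x hx hlt
        exact absurd (hlt x ((PySem.List.mem_sorted _ _ _ _).mpr ((mem_dels _ hnd x).mpr hx)))
          (lt_irrefl x)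
    congr 1
    refine PySem.List.foldl_congr_mem _ _ _ _ ?_
    intro md p hp
    have hdel : (PySem.Dict.ofList pos_cons).get? p = some "-" := (mem_dels _ hnd p).mp hp
    have hgetD : (((PySem.List.sorted
            (((PySem.Dict.ofList pos_cons).items.filter (fun pc => pc.2 == "-")).map Prod.fst)
            (fun x => x) false).foldl
          (fun a pos =>
            if pos - 1 > 1 ∧ (PySem.Dict.ofList pos_cons).get? (pos - 1) = some "-" then
              a.insert pos (a.getD (pos - 1) 0)
            else
              a.insert pos (pos - 1)) PySem.Dict.empty)).getD p 0
        = W (PySem.Dict.ofList pos_cons) (p - 1) := by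
      rw [PySem.Dict.getD_eq_get?_getD, hanchor p hdel]; rfl
    show (PySem.Dict.modify md (walkA (PySem.Dict.ofList pos_cons) ((p - 2).toNat) (p - 1)) [] (· ++ [p])) = _
    rw [hgetD]
    have hfuel : (p - 2).toNat = (p - 1 - 1).toNat := by omega
    rw [hfuel]
    rfl

-- ===== VERDICT (by name: the statement is the Claim_ definition above) =====
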